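-- pv_equiv track=rewrite | github.com/s3rvac/advent-of-code | 2025/02/aoc02_part1.py | gen_invalid_ids
-- ===== SOURCE A (Python) =====
-- def gen_invalid_ids(ranges):
--     # An invalid ID is made only of a sequence of digits repeated twice.
--     def is_invalid_id(id):
--         p1, p2 = split_in_two(str(id))
--         return p1 == p2
--
--     for min, max in ranges:
--         for id in range(min, max + 1):
--             if is_invalid_id(id):
--                 yield id
--
-- def split_in_two(s):
--     return s[: len(s) // 2], s[len(s) // 2 :]
-- ===== SOURCE B (Python) =====
-- def gen_invalid_ids(ranges):
--     # Enumerate only candidates: an invalid ID is int(str(p)+str(p)) for some p >= 1,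
--     # i.e. p * (10**len(str(p)) + 1); candidates are strictly increasing in p.
--     for lo, hi in ranges:
--         p = 1
--         while True:
--             cand = p * (10 ** len(str(p)) + 1)
--             if cand > hi:
--                 break
--             if cand >= lo:
--                 yield cand
--             p += 1
-- ===== Notes on version B (the rewrite author's own statement) =====
-- stated objective: faster
-- what changed: Instead of scanning every id in each range and string-splitting it, B enumerates only the candidates p*(10**len(str(p))+1) for p=1,2,... until they exceed the range's upper bound.
import Mathlib
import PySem

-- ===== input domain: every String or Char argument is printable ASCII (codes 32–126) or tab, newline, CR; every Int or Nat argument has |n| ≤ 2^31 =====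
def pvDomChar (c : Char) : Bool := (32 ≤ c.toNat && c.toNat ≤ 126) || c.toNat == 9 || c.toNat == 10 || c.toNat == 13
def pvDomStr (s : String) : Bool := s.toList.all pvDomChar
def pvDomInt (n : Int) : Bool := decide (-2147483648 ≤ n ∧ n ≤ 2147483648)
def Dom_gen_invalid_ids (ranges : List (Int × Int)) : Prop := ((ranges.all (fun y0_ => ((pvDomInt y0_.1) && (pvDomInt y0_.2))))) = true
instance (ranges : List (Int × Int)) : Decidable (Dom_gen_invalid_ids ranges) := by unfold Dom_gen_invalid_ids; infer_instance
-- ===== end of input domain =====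

-- B enumerates only the candidate ids int(str(p)+str(p)) = p*(10^len(str(p))+1), p = 1,2,…,
-- instead of testing every id of every range (objective: faster, asymptotically).

-- ===== PORT A =====
-- split_in_two(s): (s[: len(s)//2], s[len(s)//2 :])
def split_in_two (s : List Char) : List Char × List Char :=
  (PySem.List.slice s none (some (PySem.Int.floordiv (PySem.List.len s) 2)),
   PySem.List.slice s (some (PySem.Int.floordiv (PySem.List.len s) 2)) none)

-- is_invalid_id(id): p1, p2 = split_in_two(str(id)); return p1 == p2
def is_invalid_id (id : Int) : Bool :=
  let p := split_in_two (PySem.Int.toChars id)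
  p.1 == p.2

-- for min, max in ranges: for id in range(min, max+1): if is_invalid_id(id): yield id
def gen_invalid_ids (ranges : List (Int × Int)) : List Int :=
  ranges.foldl
    (fun acc r =>
      (PySem.List.pyRange r.1 (r.2 + 1) 1).foldl
        (fun acc2 id => if is_invalid_id id then acc2 ++ [id] else acc2) acc)
    []

-- ===== PORT B =====
-- cand = p * (10 ** len(str(p)) + 1)
def pvCand (p : Nat) : Int :=
  (p : Int) * (10 ^ (PySem.Int.toChars (p : Int)).length + 1)

-- candidates grow: the candidate for p = k+1 is at least k+2 (used for termination)
lemma pvCand_succ_ge (k : Nat) : (k : Int) + 2 ≤ pvCand (k + 1) := by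
  unfold pvCand
  have h2 : ((k + 1 : Nat) : Int) = (k : Int) + 1 := by push_cast; ring
  rw [h2]
  have h1 : (0 : Int) < 10 ^ (PySem.Int.toChars ((k : Int) + 1)).length := by positivity
  nlinarith

-- the while loop of B: p = k+1, k+2, …; break when cand > hi; yield cand when cand >= lo
def pvAltLoop (lo hi : Int) (k : Nat) : List Int :=
  if hi < pvCand (k + 1) then []
  else (if lo ≤ pvCand (k + 1) then [pvCand (k + 1)] else []) ++ pvAltLoop lo hi (k + 1)
termination_by (hi - k).toNat
decreasing_by
  have := pvCand_succ_ge k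
  simp only [not_lt] at *
  omega

def gen_invalid_ids_alt (ranges : List (Int × Int)) : List Int :=
  ranges.foldl (fun acc r => acc ++ pvAltLoop r.1 r.2 0) []

-- ===== PRECONDITION & SPEC =====
def Spec_gen_invalid_ids (ranges : List (Int × Int)) (out : List Int) : Prop := out = gen_invalid_ids_alt ranges
instance (ranges : List (Int × Int)) (out : List Int) : Decidable (Spec_gen_invalid_ids ranges out) := by unfold Spec_gen_invalid_ids; infer_instance

-- ===== CLAIM (what is proved, stated in full; the proofs are below) =====
def Claim_equal_gen_invalid_ids : Prop := ∀ (ranges : List (Int × Int)), Dom_gen_invalid_ids ranges → Spec_gen_invalid_ids ranges (gen_invalid_ids ranges)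

-- ===== LEMMAS AND PROOFS =====

-- the candidate value, on the Nat side, with the digit length from Nat.digits
def pvCandN (p : Nat) : Nat := p * (10 ^ (Nat.digits 10 p).length + 1)

-- bridge: Nat.toDigitsCore (what PySem.Int.toChars uses) is the reversed digit-character list
lemma pvToDigitsCore_eq (fuel : Nat) : ∀ (n : Nat) (ds : List Char), 0 < n → n < 10 ^ fuel →
    Nat.toDigitsCore 10 fuel n ds = ((Nat.digits 10 n).map Nat.digitChar).reverse ++ ds := by
  induction fuel with
  | zero => intro n ds h0 hf; simp at hf; omega
  | succ fuel ih =>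
    intro n ds h0 hf
    by_cases hdiv : n / 10 = 0
    · have hn10 : n < 10 := by omega
      have hstep : Nat.toDigitsCore 10 (fuel + 1) n ds = Nat.digitChar (n % 10) :: ds := by
        rw [Nat.toDigitsCore]; simp [hdiv]
      rw [hstep, Nat.digits_def' (by norm_num : (1:Nat) < 10) h0, hdiv]
      simp
    · have hstep : Nat.toDigitsCore 10 (fuel + 1) n ds
          = Nat.toDigitsCore 10 fuel (n / 10) (Nat.digitChar (n % 10) :: ds) := by
        rw [Nat.toDigitsCore]; simp [hdiv]
      have h1 : 0 < n / 10 := Nat.pos_of_ne_zero hdiv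
      have h2 : n / 10 < 10 ^ fuel := by
        rw [Nat.div_lt_iff_lt_mul (by norm_num)]
        calc n < 10 ^ (fuel + 1) := hf
          _ = 10 ^ fuel * 10 := by ring
      rw [hstep, ih (n / 10) _ h1 h2, Nat.digits_def' (by norm_num : (1:Nat) < 10) h0]
      simp

lemma pvToChars_pos (n : Nat) (h : 0 < n) :
    PySem.Int.toChars (n : Int) = ((Nat.digits 10 n).map Nat.digitChar).reverse := by
  have h1 : ¬ ((n : Int) < 0) := by omega
  have h2 : n < 10 ^ (n + 1) :=
    lt_of_lt_of_le (Nat.lt_pow_self (by norm_num)) (Nat.pow_le_pow_right (by norm_num) (by omega))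
  simp only [PySem.Int.toChars, if_neg h1, Int.toNat_natCast, Nat.toDigits]
  rw [pvToDigitsCore_eq (n + 1) n [] h h2, List.append_nil]

lemma pvDigitChar_ne_dash {d : Nat} (h : d < 10) : Nat.digitChar d ≠ '-' := by
  interval_cases d <;> decide

lemma pvDigitChar_inj {d e : Nat} (hd : d < 10) (he : e < 10)
    (h : Nat.digitChar d = Nat.digitChar e) : d = e := by
  revert h; interval_cases d <;> interval_cases e <;> decide

lemma pvMapDigitChar_inj : ∀ (l1 l2 : List Nat), (∀ x ∈ l1, x < 10) → (∀ x ∈ l2, x < 10) →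
    l1.map Nat.digitChar = l2.map Nat.digitChar → l1 = l2 := by
  intro l1
  induction l1 with
  | nil => intro l2 _ _ h; cases l2 <;> simp_all
  | cons a t ih =>
    intro l2 h1 h2 h
    cases l2 with
    | nil => simp_all
    | cons b t2 =>
      simp only [List.map_cons, List.cons.injEq] at h
      have ha := pvDigitChar_inj (h1 a (by simp)) (h2 b (by simp)) h.1
      have := ih t2 (fun x hx => h1 x (by simp [hx])) (fun x hx => h2 x (by simp [hx])) h.2
      simp [ha, this]

-- the length in pvCand is the digit count, and pvCand is pvCandN
lemma pvLen_toChars (p : Nat) (h : 0 < p) :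
    (PySem.Int.toChars (p : Int)).length = (Nat.digits 10 p).length := by
  rw [pvToChars_pos p h]; simp

lemma pvCand_eq_candN (p : Nat) (h : 0 < p) : pvCand p = ((pvCandN p : Nat) : Int) := by
  unfold pvCand pvCandN
  rw [pvLen_toChars p h]
  push_cast
  ring

lemma pvCandN_pos (p : Nat) (h : 0 < p) : 0 < pvCandN p := by
  unfold pvCandN; positivity

-- strict monotonicity of the candidate value
lemma pvCandN_lt (p q : Nat) (hp : 0 < p) (hpq : p < q) : pvCandN p < pvCandN q := by
  unfold pvCandN
  have hq : 0 < q := by omega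
  have hlen : (Nat.digits 10 p).length ≤ (Nat.digits 10 q).length := by
    rw [Nat.digits_len 10 p (by norm_num) (by omega), Nat.digits_len 10 q (by norm_num) (by omega)]
    have := Nat.log_mono_right (b := 10) (le_of_lt hpq)
    omega
  have hpow : (10 : Nat) ^ (Nat.digits 10 p).length ≤ 10 ^ (Nat.digits 10 q).length :=
    Nat.pow_le_pow_right (by norm_num) hlen
  calc p * (10 ^ (Nat.digits 10 p).length + 1)
      < q * (10 ^ (Nat.digits 10 p).length + 1) := by
        exact Nat.mul_lt_mul_of_lt_of_le hpq (le_refl _) (by positivity)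
    _ ≤ q * (10 ^ (Nat.digits 10 q).length + 1) := by
        exact Nat.mul_le_mul_left q (by omega)

lemma pvCand_lt (p q : Nat) (hp : 0 < p) (hpq : p < q) : pvCand p < pvCand q := by
  rw [pvCand_eq_candN p hp, pvCand_eq_candN q (by omega)]
  exact_mod_cast pvCandN_lt p q hp hpq

lemma pvCand_le (p q : Nat) (hp : 0 < p) (hpq : p ≤ q) : pvCand p ≤ pvCand q := by
  rcases Nat.lt_or_ge p q with h | h
  · exact le_of_lt (pvCand_lt p q hp h)
  · have : p = q := by omega
    simp [this]

-- is_invalid_id, unfolded to take/drop of the digit-character list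
lemma pvInvalid_iff_halves (id : Int) :
    is_invalid_id id = true ↔
      (PySem.Int.toChars id).take ((PySem.Int.toChars id).length / 2)
        = (PySem.Int.toChars id).drop ((PySem.Int.toChars id).length / 2) := by
  have hfd : PySem.Int.floordiv ((PySem.Int.toChars id).length : Int) 2
      = (((PySem.Int.toChars id).length / 2 : Nat) : Int) := by
    exact_mod_cast PySem.Int.floordiv_natCast (PySem.Int.toChars id).length 2
  simp only [is_invalid_id, split_in_two, PySem.List.len_eq, hfd,
    PySem.List.slice_to_natCast, PySem.List.slice_from_natCast, beq_iff_eq]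

-- characterization: the digit string of id is two equal halves iff id is a candidate value
lemma pvInvalid_iff_cand (id : Int) :
    is_invalid_id id = true ↔ ∃ p : Nat, 0 < p ∧ id = ((pvCandN p : Nat) : Int) := by
  rw [pvInvalid_iff_halves]
  constructor
  · intro hhalf
    rcases lt_or_ge id 0 with hneg | hpos
    · -- negative id: the string starts with '-', which can never occur in the second half
      exfalso
      have habs : 0 < id.natAbs := by omega
      have hs : PySem.Int.toChars id
          = '-' :: ((Nat.digits 10 id.natAbs).map Nat.digitChar).reverse := by
        simp only [PySem.Int.toChars, if_pos hneg, Nat.toDigits]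
        have h2 : id.natAbs < 10 ^ (id.natAbs + 1) :=
          lt_of_lt_of_le (Nat.lt_pow_self (by norm_num))
            (Nat.pow_le_pow_right (by norm_num) (by omega))
        rw [pvToDigitsCore_eq (id.natAbs + 1) id.natAbs [] habs h2, List.append_nil]
      set t := ((Nat.digits 10 id.natAbs).map Nat.digitChar).reverse with ht
      have htlen : 1 ≤ t.length := by
        have : Nat.digits 10 id.natAbs ≠ [] := Nat.digits_ne_nil_iff_ne_zero.mpr (by omega)
        simp [ht]
        exact List.length_pos_iff.mpr this
      rw [hs] at hhalf
      have hL : ('-' :: t).length = t.length + 1 := by simp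
      set h := ('-' :: t).length / 2 with hh
      have hh1 : 1 ≤ h := by simp [hh]; omega
      have htake : ('-' :: t).take h = '-' :: t.take (h - 1) := by
        rcases Nat.exists_eq_add_of_le hh1 with ⟨m, hm⟩
        rw [hm]
        simp [Nat.add_comm 1 m]
      have hdrop : ('-' :: t).drop h = t.drop (h - 1) := by
        rcases Nat.exists_eq_add_of_le hh1 with ⟨m, hm⟩
        rw [hm]
        simp [Nat.add_comm 1 m]
      rw [htake, hdrop] at hhalf
      have hmem : '-' ∈ t.drop (h - 1) := by rw [← hhalf]; simp
      have hmem2 : '-' ∈ t := List.mem_of_mem_drop hmem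
      rw [ht] at hmem2
      simp only [List.mem_reverse, List.mem_map] at hmem2
      rcases hmem2 with ⟨d, hd, hdc⟩
      exact pvDigitChar_ne_dash (Nat.digits_lt_base (by norm_num) hd) hdc
    · -- nonnegative id
      set n := id.toNat with hn
      have hid : id = (n : Int) := by omega
      by_cases hn0 : n = 0
      · exfalso
        rw [hid, hn0] at hhalf
        revert hhalf; decide
      · have hpos' : 0 < n := Nat.pos_of_ne_zero hn0
        rw [hid] at hhalf
        rw [pvToChars_pos n hpos'] at hhalf
        set r := Nat.digits 10 n with hr
        set s := (r.map Nat.digitChar).reverse with hs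
        set h := s.length / 2 with hh
        have hrlt : ∀ x ∈ r, x < 10 := fun x hx => Nat.digits_lt_base (by norm_num) hx
        have hLs : s.length = r.length := by simp [hs]
        -- from equal halves, the length is even: L = 2h
        have hlens : (s.take h).length = (s.drop h).length := by rw [hhalf]
        have hhle : h ≤ s.length := Nat.div_le_self _ _
        have hL2 : s.length = 2 * h := by
          simp [List.length_take, List.length_drop, Nat.min_eq_left hhle] at hlens
          omega
        have hh1 : 1 ≤ h := by
          have : r ≠ [] := Nat.digits_ne_nil_iff_ne_zero.mpr hn0
          have : 0 < r.length := List.length_pos_iff.mpr this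
          omega
        -- s = u ++ u
        set u := s.take h with hu
        have hsu : s = u ++ u := by
          conv_lhs => rw [← List.take_append_drop h s]
          rw [← hhalf]
        -- r = v ++ v with v = (reverse of u) mapped back
        have hmap : r.map Nat.digitChar = u.reverse ++ u.reverse := by
          have : (r.map Nat.digitChar) = s.reverse := by simp [hs]
          rw [this, hsu]
          simp
        have hulen : u.length = h := by
          simp [hu, List.length_take, Nat.min_eq_left hhle]
        have hrlen : r.length = 2 * h := by rw [← hLs, hL2]
        have htr : (r.take h).map Nat.digitChar = u.reverse := by
          have := congrArg (List.take h) hmap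
          rw [← List.map_take, List.take_append_of_le_length (by simp [hulen])] at this
          rw [this, List.take_of_length_le (by simp [hulen])]
        have hdr : (r.drop h).map Nat.digitChar = u.reverse := by
          have := congrArg (List.drop h) hmap
          rw [← List.map_drop] at this
          rw [this, List.drop_append_of_le_length (by simp [hulen]),
            List.drop_of_length_le (by simp [hulen]), List.nil_append]
        have hvv : r.take h = r.drop h :=
          pvMapDigitChar_inj _ _ (fun x hx => hrlt x (List.mem_of_mem_take hx))
            (fun x hx => hrlt x (List.mem_of_mem_drop hx)) (htr.trans hdr.symm)
        set v := r.take h with hv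
        have hrsplit : r = v ++ v := by
          conv_lhs => rw [← List.take_append_drop h r]
          rw [← hvv]
        have hvlen : v.length = h := by
          simp [hv, List.length_take]
          omega
        have hvne : v ≠ [] := by
          intro hcon
          rw [hcon] at hvlen
          simp at hvlen
          omega
        -- p := value of v
        set p := Nat.ofDigits 10 v with hp
        have hvlt : ∀ x ∈ v, x < 10 := fun x hx => hrlt x (List.mem_of_mem_take hx)
        have hrne : r ≠ [] := Nat.digits_ne_nil_iff_ne_zero.mpr hn0
        have hrlast : r.getLast? ≠ some 0 := by
          rw [List.getLast?_eq_getLast hrne]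
          simp only [ne_eq, Option.some.injEq]
          exact Nat.getLast_digit_ne_zero 10 hn0
        have hvlast? : v.getLast? = r.getLast? := by
          conv_rhs => rw [hrsplit]
          rw [List.getLast?_append_of_ne_nil _ hvne]
        have hvlast : ∀ (hne : v ≠ []), v.getLast hne ≠ 0 := by
          intro hne hcon
          apply hrlast
          rw [← hvlast?, List.getLast?_eq_getLast hne, hcon]
        have hdig : Nat.digits 10 p = v := Nat.digits_ofDigits 10 (by norm_num) v hvlt hvlast
        have hppos : 0 < p := by
          rcases Nat.eq_zero_or_pos p with h0 | h0
          · exfalso; rw [h0] at hdig; simp at hdig; exact hvne hdig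
          · exact h0
        refine ⟨p, hppos, ?_⟩
        have hnval : n = Nat.ofDigits 10 r := (Nat.ofDigits_digits 10 n).symm
        rw [hrsplit, Nat.ofDigits_append, ← hp, hvlen] at hnval
        have : n = pvCandN p := by
          rw [hnval]; unfold pvCandN; rw [hdig, hvlen]; ring
        rw [hid, this]
  · rintro ⟨p, hp, hid⟩
    set v := Nat.digits 10 p with hv
    set d := v.length with hd
    have hvlt : ∀ x ∈ v, x < 10 := fun x hx => Nat.digits_lt_base (by norm_num) hx
    have hvne : v ≠ [] := Nat.digits_ne_nil_iff_ne_zero.mpr (by omega)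
    have hofd : Nat.ofDigits 10 (v ++ v) = pvCandN p := by
      rw [Nat.ofDigits_append, hv, Nat.ofDigits_digits]
      unfold pvCandN
      ring
    have hdig2 : Nat.digits 10 (pvCandN p) = v ++ v := by
      rw [← hofd]
      refine Nat.digits_ofDigits 10 (by norm_num) _ ?_ ?_
      · intro x hx; rcases List.mem_append.mp hx with h | h <;> exact hvlt x h
      · intro hne hcon
        have h2 : (v ++ v).getLast? = some 0 := by
          rw [List.getLast?_eq_getLast hne, hcon]
        rw [List.getLast?_append_of_ne_nil _ hvne, List.getLast?_eq_getLast hvne,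
          Option.some.injEq] at h2
        have := Nat.getLast_digit_ne_zero 10 (Nat.pos_iff_ne_zero.mp hp)
        exact this h2
    have hcpos : 0 < pvCandN p := pvCandN_pos p hp
    rw [hid, pvToChars_pos _ hcpos, hdig2]
    set u := (v.map Nat.digitChar).reverse with hu
    have hsplit : ((v ++ v).map Nat.digitChar).reverse = u ++ u := by simp [hu]
    rw [hsplit]
    have hulen : u.length = d := by simp [hu, hd]
    have hlen2 : (u ++ u).length / 2 = d := by simp [hulen]; omega
    rw [hlen2, ← hulen, List.take_left, List.drop_left]

-- membership in B's loop output
lemma pvMem_altLoop (lo hi : Int) (k : Nat) (x : Int) :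
    x ∈ pvAltLoop lo hi k ↔ ∃ p : Nat, k < p ∧ x = pvCand p ∧ lo ≤ x ∧ x ≤ hi := by
  rw [pvAltLoop]
  by_cases hbreak : hi < pvCand (k + 1)
  · rw [if_pos hbreak]
    simp only [List.not_mem_nil, false_iff, not_exists]
    intro p hcon
    rcases hcon with ⟨hkp, hx, _, hxhi⟩
    have : pvCand (k + 1) ≤ pvCand p := pvCand_le (k + 1) p (by omega) (by omega)
    omega
  · rw [if_neg hbreak]
    push_neg at hbreak
    rw [List.mem_append, pvMem_altLoop lo hi (k + 1) x]
    constructor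
    · rintro (hpre | ⟨p, hkp, hx, hlo, hhi⟩)
      · by_cases hyield : lo ≤ pvCand (k + 1)
        · rw [if_pos hyield] at hpre
          simp at hpre
          exact ⟨k + 1, by omega, hpre, by omega, by omega⟩
        · rw [if_neg hyield] at hpre
          simp at hpre
      · exact ⟨p, by omega, hx, hlo, hhi⟩
    · rintro ⟨p, hkp, hx, hlo, hhi⟩
      by_cases hp1 : p = k + 1
      · subst hp1
        left
        rw [if_pos (by omega : lo ≤ pvCand (k + 1))]
        simp [hx]
      · right
        exact ⟨p, by omega, hx, hlo, hhi⟩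
termination_by (hi - k).toNat
decreasing_by
  have := pvCand_succ_ge k
  simp only [not_lt] at hbreak
  omega

-- B's loop output is strictly increasing
lemma pvPairwise_altLoop (lo hi : Int) (k : Nat) :
    (pvAltLoop lo hi k).Pairwise (· < ·) := by
  rw [pvAltLoop]
  by_cases hbreak : hi < pvCand (k + 1)
  · rw [if_pos hbreak]; simp
  · rw [if_neg hbreak]
    apply List.pairwise_append.mpr
    refine ⟨?_, pvPairwise_altLoop lo hi (k + 1), ?_⟩
    · split <;> simp
    · intro a ha b hb
      have hbmem := (pvMem_altLoop lo hi (k + 1) b).mp hb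
      rcases hbmem with ⟨p, hkp, hbx, _, _⟩
      have ha' : a = pvCand (k + 1) := by
        revert ha; split <;> simp_all
      rw [ha', hbx]
      exact pvCand_lt (k + 1) p (by omega) (by omega)
termination_by (hi - k).toNat
decreasing_by
  have := pvCand_succ_ge k
  simp only [not_lt] at hbreak
  omega

-- per-range equality: filtering the full range = B's candidate scan
lemma pvPerRange (lo hi : Int) :
    (PySem.List.pyRange lo (hi + 1) 1).filter is_invalid_id = pvAltLoop lo hi 0 := by
  have hmem : ∀ x : Int,
      x ∈ (PySem.List.pyRange lo (hi + 1) 1).filter is_invalid_id ↔ x ∈ pvAltLoop lo hi 0 := by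
    intro x
    rw [List.mem_filter, PySem.List.mem_pyRange_one, pvMem_altLoop, pvInvalid_iff_cand]
    constructor
    · rintro ⟨⟨hlo, hhi⟩, p, hp, hx⟩
      refine ⟨p, hp, ?_, hlo, by omega⟩
      rw [hx, pvCand_eq_candN p hp]
    · rintro ⟨p, hp, hx, hlo, hhi⟩
      rw [pvCand_eq_candN p hp] at hx
      exact ⟨⟨hlo, by omega⟩, p, hp, hx⟩
  have hpw1 : ((PySem.List.pyRange lo (hi + 1) 1).filter is_invalid_id).Pairwise (· < ·) :=
    (PySem.List.pairwise_lt_pyRange_one lo (hi + 1)).filter _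
  have hpw2 : (pvAltLoop lo hi 0).Pairwise (· < ·) := pvPairwise_altLoop lo hi 0
  have hnd1 := hpw1.imp (fun h => ne_of_lt h)
  have hnd2 := hpw2.imp (fun h => ne_of_lt h)
  have hperm := (List.perm_ext_iff_of_nodup hnd1 hnd2).mpr hmem
  exact List.eq_of_perm_of_sorted
    (fun a b _ _ h1 h2 => absurd (lt_trans h1 h2) (lt_irrefl a)) hpw1 hpw2 hperm

-- outer loop: both fold over the ranges appending the per-range lists
lemma pvFold_eq (ranges : List (Int × Int)) : ∀ acc : List Int,
    ranges.foldl
      (fun acc r =>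
        (PySem.List.pyRange r.1 (r.2 + 1) 1).foldl
          (fun acc2 id => if is_invalid_id id then acc2 ++ [id] else acc2) acc)
      acc
    = ranges.foldl (fun acc r => acc ++ pvAltLoop r.1 r.2 0) acc := by
  induction ranges with
  | nil => intro acc; rfl
  | cons r t ih =>
    intro acc
    simp only [List.foldl_cons]
    rw [PySem.List.foldl_append_if_eq_filter, pvPerRange r.1 r.2, ih]

-- ===== VERDICT (by name: the statement is the Claim_ definition above) =====
theorem gen_invalid_ids_spec : Claim_equal_gen_invalid_ids := by
  intro ranges _
  unfold Spec_gen_invalid_ids gen_invalid_ids gen_invalid_ids_alt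
  exact pvFold_eq ranges []
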